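-- pv_equiv track=rewrite | github.com/JadingTsunami/umapinfo-designer | UMAPINFODesigner/uio/parser.py | is_tuple
-- ===== SOURCE A (Python) =====
-- def is_tuple(val):
--     skip = False
--     quote = False
--     for c in val:
--         if skip:
--             skip = False
--         elif c == "\\":
--             skip = True
--         elif c == '"':
--             quote = not quote
--         elif c == ',' and not quote:
--             return True
--     return False
-- ===== SOURCE B (Python) =====
-- def is_tuple(val):
--     # Pass 1: drop every backslash-escaped character pair.
--     cleaned = []
--     it = iter(val)
--     for c in it:
--         if c == '\\':
--             next(it, None)
--         else:
--             cleaned.append(c)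
--     # Pass 2: split on double quotes; even-indexed parts lie outside quotes.
--     parts = ''.join(cleaned).split('"')
--     return any(',' in part for part in parts[::2])
-- ===== Notes on version B (the rewrite author's own statement) =====
-- stated objective: alternative
-- what changed: Replaces the single-pass skip/quote flag scan with early return by a multi-pass pipeline: strip backslash-escaped pairs, split the remainder on the double-quote character, and test only the even-indexed (outside-quote) parts for a comma.
import Mathlib
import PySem

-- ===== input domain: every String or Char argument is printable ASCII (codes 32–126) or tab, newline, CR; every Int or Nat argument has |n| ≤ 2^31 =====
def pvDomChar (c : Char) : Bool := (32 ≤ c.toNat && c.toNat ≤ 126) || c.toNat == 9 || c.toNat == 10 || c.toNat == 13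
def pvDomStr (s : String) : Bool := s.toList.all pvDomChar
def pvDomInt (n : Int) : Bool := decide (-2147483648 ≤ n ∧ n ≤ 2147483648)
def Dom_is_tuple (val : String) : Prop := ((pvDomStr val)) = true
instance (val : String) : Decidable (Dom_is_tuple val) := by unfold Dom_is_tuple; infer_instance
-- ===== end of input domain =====

-- B replaces A's single-pass skip/quote flag scan by a multi-pass pipeline (strip
-- escaped pairs, split on '"', check even-indexed parts for a comma): alternative shape.

-- ===== PORT A =====
-- the for-loop of A with its two flags `skip` and `quote`; `return True` = result true
def isTupleGo : List Char → Bool → Bool → Bool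
  | [], _, _ => false
  | c :: cs, skip, quote =>
    if skip then isTupleGo cs false quote
    else if c = '\\' then isTupleGo cs true quote
    else if c = '"' then isTupleGo cs skip (!quote)
    else if c = ',' && !quote then true
    else isTupleGo cs skip quote

def is_tuple (val : String) : Bool := isTupleGo val.toList false false

-- ===== PORT B =====
-- pass 1 of Source B: the for-loop over iter(val) that drops each '\' together with
-- the following character (next(it, None)); a trailing lone '\' is dropped too
def stripEsc : List Char → List Char
  | [] => []
  | c :: cs => if c = '\\' then stripEsc cs.tail else c :: stripEsc cs
termination_by l => l.length

-- ''.join(cleaned).split('"') is ported as List.splitOn '"' (exactly str.split for a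
-- one-char separator); parts[::2] is PySem.List.slice? … 2 (always some; getD [] only
-- totalises the Option); ',' in part is PySem.Chars.isIn
def is_tuple_alt (val : String) : Bool :=
  ((PySem.List.slice? (List.splitOn '"' (stripEsc val.toList)) none none 2).getD []).any
    (fun part => PySem.Chars.isIn [','] part)

-- ===== PRECONDITION & SPEC =====
def Spec_is_tuple (val : String) (out : Bool) : Prop := out = is_tuple_alt val
instance (val : String) (out : Bool) : Decidable (Spec_is_tuple val out) := by unfold Spec_is_tuple; infer_instance

-- ===== CLAIM (what is proved, stated in full; the proofs are below) =====
def Claim_equal_is_tuple : Prop := ∀ (val : String), Dom_is_tuple val → Spec_is_tuple val (is_tuple val)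

-- ===== LEMMAS AND PROOFS =====

-- proof-level intermediary: scan the escape-free text with only the quote flag
def checkScan : List Char → Bool → Bool
  | [], _ => false
  | c :: cs, q =>
    if c = '"' then checkScan cs (!q)
    else (c = ',' && !q) || checkScan cs q

-- proof-level intermediary: comma test over parts, keeping every other part
def evensHas : List (List Char) → Bool → Bool
  | [], _ => false
  | p :: ps, t => (t && PySem.Chars.isIn [','] p) || evensHas ps (!t)

-- proof-level intermediary: the even-indexed elements of a list
def evensRec {α : Type} : List α → List α
  | [] => []
  | [a] => [a]
  | a :: _ :: t => a :: evensRec t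

theorem singleton_isIn (a : Char) (l : List Char) :
    PySem.Chars.isIn [a] l = l.contains a := by
  by_cases h : a ∈ l
  · obtain ⟨s, t, rfl⟩ := List.append_of_mem h
    have hinf : [a] <:+: s ++ a :: t := ⟨s, t, by simp⟩
    rw [(PySem.Chars.isIn_iff_infix _ _).2 hinf]
    simp [h]
  · have hinf : ¬ ([a] <:+: l) := fun hinf => h (hinf.subset (by simp))
    rw [(PySem.Chars.isIn_eq_false_iff _ _).2 hinf]
    simp [h]

theorem strip_scan (cs : List Char) (q : Bool) :
    isTupleGo cs false q = checkScan (stripEsc cs) q := by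
  induction cs using stripEsc.induct generalizing q with
  | case1 => simp [isTupleGo, stripEsc, checkScan]
  | case2 cs ih =>
    cases cs with
    | nil => simp [isTupleGo, stripEsc, checkScan]
    | cons d ds =>
      simp only [stripEsc, List.tail_cons] at ih ⊢
      simp [isTupleGo, ih]
  | case3 c cs h ih =>
    by_cases hq : c = '"'
    · subst hq
      simp [isTupleGo, stripEsc, checkScan, ih]
    · by_cases hc : c = ','
      · subst hc
        cases q <;> simp [isTupleGo, stripEsc, checkScan, h, ih]
      · simp [isTupleGo, stripEsc, checkScan, h, hq, hc, ih]

theorem scan_split (l : List Char) (q : Bool) :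
    checkScan l q = evensHas (List.splitOn '"' l) (!q) := by
  induction l generalizing q with
  | nil => simp [checkScan, List.splitOn, List.splitOnP_nil, evensHas, singleton_isIn]
  | cons c cs ih =>
    by_cases hq : c = '"'
    · subst hq
      simp only [checkScan, List.splitOn, List.splitOnP_cons, beq_self_eq_true]
      rw [ih (!q)]
      simp [List.splitOn, singleton_isIn, evensHas, Bool.not_not]
    · obtain ⟨p, ps, hps⟩ := List.exists_cons_of_ne_nil (List.splitOnP_ne_nil (· == '"') cs)
      simp only [checkScan, ih q, List.splitOn, List.splitOnP_cons,
        beq_iff_eq, if_neg hq, hps, List.modifyHead_cons, evensHas]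
      have hcc : PySem.Chars.isIn [','] (c :: p) = ((c = ',') || PySem.Chars.isIn [','] p) := by
        simp [singleton_isIn, eq_comm]
      rw [hcc]
      cases q <;> cases hc : decide (c = ',') <;> simp_all

theorem filterMap_even {α : Type} (xs : List α) :
    List.filterMap (fun k : ℕ => xs[2*k]?) (List.range ((xs.length + 1) / 2)) = evensRec xs := by
  induction xs using evensRec.induct with
  | case1 => simp [evensRec]
  | case2 a => simp [evensRec]
  | case3 a b t ih =>
    have hlen : (t.length + 1 + 1 + 1) / 2 = (t.length + 1) / 2 + 1 := by omega
    simp only [List.length_cons, hlen, List.range_succ_eq_map, List.filterMap_cons,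
      List.filterMap_map]
    have hstep : ∀ k : ℕ, (a :: b :: t)[2*(k+1)]? = t[2*k]? := by
      intro k
      have h2 : 2*(k+1) = 2*k+2 := by omega
      simp [h2]
    simp only [Nat.mul_zero, List.getElem?_cons_zero, Function.comp_def]
    rw [List.filterMap_congr (by intro k _; exact hstep k)]
    simp [evensRec, ih]

theorem slice_two {α : Type} (xs : List α) :
    PySem.List.slice? xs none none 2 = some (evensRec xs) := by
  simp only [PySem.List.slice?, PySem.List.sliceIndices]
  norm_num
  have hc : (if 0 < xs.length then (((xs.length : Int) + 2 - 1) / 2).toNat else 0)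
      = (xs.length + 1) / 2 := by
    split <;> omega
  rw [hc, ← filterMap_even xs]
  apply List.filterMap_congr
  intro k _
  have h2 : (2 * (k : Int)).toNat = 2 * k := by omega
  simp [h2]

theorem evensHas_any (ps : List (List Char)) :
    evensHas ps true = (evensRec ps).any (fun p => PySem.Chars.isIn [','] p) := by
  induction ps using evensRec.induct with
  | case1 => simp [evensHas, evensRec]
  | case2 a => simp [evensHas, evensRec]
  | case3 a b t ih => simp [evensHas, evensRec, ih]

-- ===== VERDICT (by name: the statement is the Claim_ definition above) =====
theorem is_tuple_spec : Claim_equal_is_tuple := by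
  intro val _
  unfold Spec_is_tuple is_tuple is_tuple_alt
  rw [strip_scan, scan_split, slice_two]
  simp [evensHas_any]
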